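-- pv_equiv track=rewrite | github.com/nyxssmith/jenkinsTests | fontio3/build/lib.linux-x86_64-3.6/fontio3/mort/contextual.py | _findPuzzleFit
-- ===== SOURCE A (Python) =====
-- def _findPuzzleFit(d, cumulation):
--     lowGlyph = min(d)
--     thisSet = {n - lowGlyph for n in d}
--     delta = 0
--
--     while thisSet & cumulation:
--         delta += 1
--         thisSet = {n + 1 for n in thisSet}
--
--     return delta
-- ===== SOURCE B (Python) =====
-- def _findPuzzleFit(d, cumulation):
--     low = min(d)
--     forbidden = {c - n + low for n in d for c in cumulation}
--     delta = 0
--     while delta in forbidden: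
--         delta += 1
--     return delta
-- ===== Notes on version B (the rewrite author's own statement) =====
-- stated objective: faster
-- what changed: Instead of repeatedly shifting the whole glyph set and re-intersecting it with cumulation at every candidate delta, B precomputes once the set of forbidden deltas {c - n + low} and returns the smallest nonnegative integer not in it.
import Mathlib
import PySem

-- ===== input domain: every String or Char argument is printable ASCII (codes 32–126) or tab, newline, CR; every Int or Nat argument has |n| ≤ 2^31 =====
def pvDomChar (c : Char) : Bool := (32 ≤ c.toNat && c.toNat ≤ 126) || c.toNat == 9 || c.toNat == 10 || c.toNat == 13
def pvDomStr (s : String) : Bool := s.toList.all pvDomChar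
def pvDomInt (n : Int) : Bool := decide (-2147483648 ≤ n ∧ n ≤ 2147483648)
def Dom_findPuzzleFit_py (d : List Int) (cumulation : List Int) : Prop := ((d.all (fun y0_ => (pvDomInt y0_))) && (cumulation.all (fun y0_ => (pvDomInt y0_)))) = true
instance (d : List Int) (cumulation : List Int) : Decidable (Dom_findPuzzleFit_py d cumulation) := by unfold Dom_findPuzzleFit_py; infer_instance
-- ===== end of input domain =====

-- B replaces A's repeated shift-and-intersect scan by a one-shot forbidden-delta set
-- plus a scan for the smallest nonnegative integer absent from it (objective: faster).


-- ===== PORT A =====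
-- upper bound on the absolute values of a list's elements (fuel bound for the while loops)
def pvMaxAbs (l : List Int) : Nat := l.foldl (fun a c => max a c.natAbs) 0

-- A's while loop: while thisSet & cumulation: delta += 1; thisSet = {n + 1 for n in thisSet}.
-- Fuel pvMaxAbs cumulation + 2 provably suffices (elements of thisSet are ≥ delta), so the
-- loop always exits before fuel runs out; the fuel only makes the recursion structural.
def pvLoopA (cumulation : List Int) : Nat → Int → PySem.Set Int → Int
  | 0, delta, _ => delta
  | fuel + 1, delta, s =>
    if PySem.Set.inter s cumulation = [] then delta
    else pvLoopA cumulation fuel (delta + 1) (PySem.Set.ofList (s.map (· + 1)))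

def findPuzzleFit_py (d : List Int) (cumulation : List Int) : Int :=
  match PySem.List.min? d (fun x => x) with
  | none => 0   -- unreachable under Pre_ (min([]) raises ValueError)
  | some lowGlyph =>
    pvLoopA cumulation (pvMaxAbs cumulation + 2) 0
      (PySem.Set.ofList (d.map (fun n => n - lowGlyph)))

-- ===== PORT B =====
-- B's while loop: while delta in forbidden: delta += 1.  Fuel pvMaxAbs forbidden + 2
-- provably suffices (every element of forbidden has absolute value ≤ pvMaxAbs forbidden).
def pvLoopB (forbidden : PySem.Set Int) : Nat → Int → Int
  | 0, delta => delta
  | fuel + 1, delta =>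
    if forbidden.contains delta then pvLoopB forbidden fuel (delta + 1) else delta

def findPuzzleFit_py_alt (d : List Int) (cumulation : List Int) : Int :=
  match PySem.List.min? d (fun x => x) with
  | none => 0   -- unreachable under Pre_ (min([]) raises ValueError)
  | some low =>
    let forbidden : PySem.Set Int :=
      PySem.Set.ofList (d.flatMap (fun n => cumulation.map (fun c => c - n + low)))
    pvLoopB forbidden (pvMaxAbs forbidden + 2) 0

-- ===== PRECONDITION & SPEC =====
-- Pre_ excludes only empty d, on which A's min(d) raises ValueError (B raises there too).
def Pre_findPuzzleFit_py (d : List Int) (cumulation : List Int) : Prop := d ≠ []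
instance (d : List Int) (cumulation : List Int) : Decidable (Pre_findPuzzleFit_py d cumulation) := by unfold Pre_findPuzzleFit_py; infer_instance
def pvWitness_findPuzzleFit_py : List Int × List Int := ([2, 5], [0, 1, 3])

def Spec_findPuzzleFit_py (d : List Int) (cumulation : List Int) (out : Int) : Prop := out = findPuzzleFit_py_alt d cumulation
instance (d : List Int) (cumulation : List Int) (out : Int) : Decidable (Spec_findPuzzleFit_py d cumulation out) := by unfold Spec_findPuzzleFit_py; infer_instance

-- ===== CLAIM (what is proved, stated in full; the proofs are below) =====
def Claim_equal_findPuzzleFit_py : Prop := ∀ (d : List Int) (cumulation : List Int), Dom_findPuzzleFit_py d cumulation → Pre_findPuzzleFit_py d cumulation → Spec_findPuzzleFit_py d cumulation (findPuzzleFit_py d cumulation)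

-- ===== LEMMAS AND PROOFS =====

-- generic "count up from delta while q holds" loop both ports reduce to
def pvCountUp (q : Int → Bool) : Nat → Int → Int
  | 0, delta => delta
  | fuel + 1, delta => if q delta then pvCountUp q fuel (delta + 1) else delta

theorem pvInit_le (l : List Int) : ∀ b : Nat, b ≤ l.foldl (fun a c => max a c.natAbs) b := by
  induction l with
  | nil => intro b; simp
  | cons y t ih =>
    intro b
    simp only [List.foldl_cons]
    exact le_trans (le_max_left _ _) (ih (max b y.natAbs))

theorem pvMaxAbs_le {l : List Int} {x : Int} (hx : x ∈ l) : x.natAbs ≤ pvMaxAbs l := by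
  unfold pvMaxAbs
  suffices h : ∀ b : Nat, x.natAbs ≤ l.foldl (fun a c => max a c.natAbs) b from h 0
  induction l with
  | nil => cases hx
  | cons y t ih =>
    intro b
    simp only [List.foldl_cons]
    rcases List.mem_cons.mp hx with h | h
    · subst h; exact le_trans (le_max_right _ _) (pvInit_le t _)
    · exact ih h (max b y.natAbs)

-- two sufficient fuels give the same answer
theorem pvCountUp_eq (q : Int → Bool) (f1 f2 : Nat) (delta : Int)
    (h1 : ∃ k : Nat, k < f1 ∧ q (delta + k) = false)
    (h2 : ∃ k : Nat, k < f2 ∧ q (delta + k) = false) :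
    pvCountUp q f1 delta = pvCountUp q f2 delta := by
  induction f1 generalizing f2 delta with
  | zero => obtain ⟨k, hk, _⟩ := h1; omega
  | succ f1 ih =>
    cases f2 with
    | zero => obtain ⟨k, hk, _⟩ := h2; omega
    | succ f2 =>
      simp only [pvCountUp]
      by_cases hq : q delta = true
      · simp only [hq, if_true]
        obtain ⟨k1, hk1, hq1⟩ := h1
        obtain ⟨k2, hk2, hq2⟩ := h2
        have hk1' : k1 ≠ 0 := by rintro rfl; simp at hq1; rw [hq1] at hq; simp at hq
        have hk2' : k2 ≠ 0 := by rintro rfl; simp at hq2; rw [hq2] at hq; simp at hq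
        apply ih
        · exact ⟨k1 - 1, by omega, by rw [show delta + 1 + (↑(k1 - 1) : Int) = delta + k1 by omega]; exact hq1⟩
        · exact ⟨k2 - 1, by omega, by rw [show delta + 1 + (↑(k2 - 1) : Int) = delta + k2 by omega]; exact hq2⟩
      · simp [hq]

-- A's loop is pvCountUp over q, under the invariant describing its set state
theorem pvLoopA_eq (d cumulation : List Int) (low : Int)
    (q : Int → Bool) (hq : q = fun δ => d.any (fun n => cumulation.contains (n - low + δ)))
    (fuel : Nat) (delta : Int) (s : PySem.Set Int)
    (hs : ∀ x, x ∈ s ↔ ∃ n ∈ d, x = n - low + delta) :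
    pvLoopA cumulation fuel delta s = pvCountUp q fuel delta := by
  induction fuel generalizing delta s with
  | zero => rfl
  | succ fuel ih =>
    simp only [pvLoopA, pvCountUp]
    have hcond : (PySem.Set.inter s cumulation = []) ↔ (q delta = false) := by
      subst hq
      simp only [PySem.Set.inter, List.filter_eq_nil_iff, PySem.Set.contains,
        List.any_eq_false, List.contains_iff_mem]
      constructor
      · intro h n hn
        exact h (n - low + delta) ((hs _).mpr ⟨n, hn, rfl⟩)
      · intro h x hx
        obtain ⟨n, hn, rfl⟩ := (hs x).mp hx
        exact h n hn
    by_cases hzero : q delta = true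
    · have : ¬ (PySem.Set.inter s cumulation = []) := by
        intro h; rw [hcond.mp h] at hzero; simp at hzero
      rw [if_neg this, if_pos hzero]
      apply ih
      intro x
      simp only [PySem.Set.mem_ofList, List.mem_map]
      constructor
      · rintro ⟨y, hy, rfl⟩
        obtain ⟨n, hn, rfl⟩ := (hs y).mp hy
        exact ⟨n, hn, by ring⟩
      · rintro ⟨n, hn, rfl⟩
        exact ⟨n - low + delta, (hs _).mpr ⟨n, hn, rfl⟩, by ring⟩
    · have hzero' : q delta = false := by revert hzero; cases q delta <;> simp
      rw [if_pos (hcond.mpr hzero'), if_neg (by simp [hzero'])]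

-- B's loop is pvCountUp over membership in the forbidden set
theorem pvLoopB_eq (F : PySem.Set Int) (fuel : Nat) (delta : Int) :
    pvLoopB F fuel delta = pvCountUp (fun δ => F.contains δ) fuel delta := by
  induction fuel generalizing delta with
  | zero => rfl
  | succ fuel ih => simp only [pvLoopB, pvCountUp]; split <;> simp_all

-- ===== VERDICT (by name: the statement is the Claim_ definition above) =====
theorem findPuzzleFit_py_spec : Claim_equal_findPuzzleFit_py := by
  intro d cumulation _hDom hPre
  unfold Spec_findPuzzleFit_py findPuzzleFit_py findPuzzleFit_py_alt
  cases hmin : PySem.List.min? d (fun x => x) with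
  | none => rfl
  | some low =>
    have hlow : ∀ n ∈ d, low ≤ n := PySem.List.min?_isMin hmin
    have hlowmem : low ∈ d := PySem.List.min?_mem hmin
    set F : PySem.Set Int :=
      PySem.Set.ofList (d.flatMap (fun n => cumulation.map (fun c => c - n + low))) with hF
    set q : Int → Bool := fun δ => d.any (fun n => cumulation.contains (n - low + δ)) with hqdef
    have hqF : ∀ δ, F.contains δ = q δ := by
      intro δ
      have : F.contains δ = true ↔ q δ = true := by
        rw [hF, hqdef]
        simp only [PySem.Set.contains_iff, PySem.Set.mem_ofList, List.mem_flatMap,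
          List.mem_map, List.any_eq_true, List.contains_iff_mem]
        constructor
        · rintro ⟨n, hn, c, hc, rfl⟩
          exact ⟨n, hn, by rwa [show n - low + (c - n + low) = c by ring]⟩
        · rintro ⟨n, hn, hc⟩
          exact ⟨n, hn, n - low + δ, hc, by ring⟩
      revert this; cases F.contains δ <;> cases q δ <;> simp
    -- fuel sufficiency on the A side
    have hA : q ((pvMaxAbs cumulation : Int) + 1) = false := by
      rw [hqdef]
      simp only [List.any_eq_false, List.contains_iff_mem]
      intro n hn hc
      have h1 := pvMaxAbs_le hc
      have h2 := hlow n hn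
      omega
    -- fuel sufficiency on the B side
    have hB : q ((pvMaxAbs F : Int) + 1) = false := by
      rw [← hqF]
      cases hc : F.contains ((pvMaxAbs F : Int) + 1) with
      | false => rfl
      | true =>
        have hm : ((pvMaxAbs F : Int) + 1) ∈ F := (PySem.Set.contains_iff F _).mp hc
        have hle : ((pvMaxAbs F : Int) + 1).natAbs ≤ pvMaxAbs F := pvMaxAbs_le hm
        omega
    simp only [hmin]
    rw [← hF]
    rw [pvLoopA_eq d cumulation low q hqdef _ 0 _
        (by intro x
            simp only [PySem.Set.mem_ofList, List.mem_map]
            constructor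
            · rintro ⟨n, hn, rfl⟩; exact ⟨n, hn, by ring⟩
            · rintro ⟨n, hn, rfl⟩; exact ⟨n, hn, by ring⟩),
        pvLoopB_eq]
    rw [funext hqF]
    apply pvCountUp_eq
    · exact ⟨pvMaxAbs cumulation + 1, by omega, by simpa using hA⟩
    · exact ⟨pvMaxAbs F + 1, by omega, by simpa using hB⟩
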